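-- pv_equiv track=rewrite | github.com/a-gram/udsp | udsp/core/mtx.py | mat_reverse
-- ===== SOURCE A (Python) =====
-- def mat_copy(a):
--     """
--     Creates a duplicate of a matrix
--
--     Parameters
--     ----------
--     a: list[list]
--         A matrix of scalar values to be copied
--
--     Returns
--     -------
--     list[list]
--         A copy of the given matrix
--
--     """
--     if mat_is_void(a):
--         return a
--
--     return [row.copy() for row in a]
--
-- def mat_is_void(a):
--     """
--     Check whether a given matrix is void
--
--     A matrix is considered as "void" if it is None or []
--
--     Parameters
--     ----------
--     a: list[list]
--         The matrix to be checked
--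
--     Returns
--     -------
--     bool
--         True if the matrix is void, False otherwise
--
--     """
--     return a is None or len(a) == 0
--
-- def mat_reverse(a, rows=True, cols=True):
--     """
--     Reverses a matrix along the rows and/or columns
--
--     Parameters
--     ----------
--     a: list[list]
--         A matrix of scalar values
--     rows: bool, optional
--         If True, the matrix is reversed along the rows
--     cols: bool, optional
--         If True, the matrix is reversed along the columns
--
--     Returns
--     -------
--     list[list]
--         The reversed matrix
--
--     """
--     if rows and cols:
--         return [a[n][::-1] for n in reversed(range(len(a)))]
--     elif cols:
--         return a[::-1]
--     elif rows:
--         return [row[::-1] for row in a]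
--     else:
--         return mat_copy(a)
-- ===== SOURCE B (Python) =====
-- def mat_is_void(a):
--     return a is None or len(a) == 0
--
-- def mat_copy(a):
--     if mat_is_void(a):
--         return a
--     return [row.copy() for row in a]
--
-- def mat_reverse(a, rows=True, cols=True):
--     if not rows and not cols:
--         return mat_copy(a)
--     # single pass with an accumulator: prepend to reverse the outer list,
--     # and reverse each row by an inner prepend-accumulator loop
--     out = []
--     for row in a:
--         if rows:
--             r = []
--             for x in row:
--                 r.insert(0, x)
--             row = r
--         if cols:
--             out.insert(0, row)
--         else:
--             out.append(row)
--     return out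
-- ===== Notes on version B (the rewrite author's own statement) =====
-- stated objective: alternative
-- what changed: Replaces A's four independent slice-based return branches with a single pass over the rows carrying an accumulator: each row is reversed (when rows) by an inner prepend-accumulator loop instead of a slice, and the outer reversal (when cols) is obtained by prepending to the accumulator instead of slicing, so no slicing or index arithmetic remains.
import Mathlib
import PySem

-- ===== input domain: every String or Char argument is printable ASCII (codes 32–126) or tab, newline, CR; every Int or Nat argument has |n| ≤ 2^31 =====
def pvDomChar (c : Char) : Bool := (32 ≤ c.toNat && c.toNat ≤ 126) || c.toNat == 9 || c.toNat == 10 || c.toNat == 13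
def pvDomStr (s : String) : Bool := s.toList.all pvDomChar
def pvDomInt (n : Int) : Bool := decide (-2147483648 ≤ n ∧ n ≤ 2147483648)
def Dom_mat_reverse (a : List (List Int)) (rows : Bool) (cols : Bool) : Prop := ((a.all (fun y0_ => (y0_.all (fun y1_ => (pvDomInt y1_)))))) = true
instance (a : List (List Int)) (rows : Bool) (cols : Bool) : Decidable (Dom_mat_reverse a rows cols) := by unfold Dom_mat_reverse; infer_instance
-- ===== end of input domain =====

-- B replaces A's four slice branches by one accumulator pass (prepend reverses); return-value equivalence
-- only — Python's aliasing/copy behaviour is not modelled here.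

-- ===== PORT A =====
-- mat_is_void: a is None or len(a) == 0  (None is not representable for List; len check only)
def mat_is_void (a : List (List Int)) : Bool := a.length == 0

-- mat_copy: [row.copy() for row in a] (row.copy() is the same value)
def mat_copy (a : List (List Int)) : List (List Int) :=
  if mat_is_void a then a else a.map (fun row => row)

def mat_reverse (a : List (List Int)) (rows : Bool) (cols : Bool) : List (List Int) :=
  if rows && cols then
    -- [a[n][::-1] for n in reversed(range(len(a)))]
    ((PySem.List.pyRange 0 (a.length : Int) 1).reverse).map
      (fun n => ((PySem.List.slice? (PySem.List.pyGetD a n []) none none (-1)).getD []))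
  else if cols then
    -- a[::-1]
    (PySem.List.slice? a none none (-1)).getD []
  else if rows then
    -- [row[::-1] for row in a]
    a.map (fun row => (PySem.List.slice? row none none (-1)).getD [])
  else
    mat_copy a

-- ===== PORT B =====
def mat_is_void_b (a : List (List Int)) : Bool := a.length == 0

def mat_copy_b (a : List (List Int)) : List (List Int) :=
  if mat_is_void_b a then a else a.map (fun row => row)

-- one fold over the rows; r.insert(0, x) / out.insert(0, row) ported as PySem.List.insert _ 0 _
def mat_reverse_alt (a : List (List Int)) (rows : Bool) (cols : Bool) : List (List Int) :=
  if !rows && !cols then mat_copy_b a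
  else
    a.foldl
      (fun out row =>
        let row := if rows then row.foldl (fun r x => PySem.List.insert r 0 x) [] else row
        if cols then PySem.List.insert out 0 row else out ++ [row])
      []

-- ===== PRECONDITION & SPEC =====
def Spec_mat_reverse (a : List (List Int)) (rows : Bool) (cols : Bool) (out : List (List Int)) : Prop := out = mat_reverse_alt a rows cols
instance (a : List (List Int)) (rows : Bool) (cols : Bool) (out : List (List Int)) : Decidable (Spec_mat_reverse a rows cols out) := by unfold Spec_mat_reverse; infer_instance

-- ===== CLAIM =====
def Claim_equal_mat_reverse : Prop := ∀ (a : List (List Int)) (rows : Bool) (cols : Bool), Dom_mat_reverse a rows cols → Spec_mat_reverse a rows cols (mat_reverse a rows cols)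

-- ===== LEMMAS AND PROOFS =====

-- inner prepend loop reverses the row
theorem foldl_insert_zero_rev {α : Type} (l acc : List α) :
    l.foldl (fun r x => PySem.List.insert r 0 x) acc = l.reverse ++ acc := by
  induction l generalizing acc with
  | nil => simp
  | cons x xs ih => simp [List.foldl, PySem.List.insert_zero, ih]

-- outer prepend loop reverses the (mapped) matrix
theorem foldl_prepend_map {α β : Type} (f : α → β) (l : List α) (acc : List β) :
    l.foldl (fun out row => PySem.List.insert out 0 (f row)) acc = (l.map f).reverse ++ acc := by
  induction l generalizing acc with
  | nil => simp
  | cons x xs ih => simp [List.foldl, PySem.List.insert_zero, ih]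

-- outer append loop maps
theorem foldl_append_map {α β : Type} (f : α → β) (l : List α) (acc : List β) :
    l.foldl (fun out row => out ++ [f row]) acc = acc ++ l.map f := by
  induction l generalizing acc with
  | nil => simp
  | cons x xs ih => simp [List.foldl, ih]

-- ===== VERDICT =====
theorem mat_reverse_spec : Claim_equal_mat_reverse := by
  intro a rows cols _
  unfold Spec_mat_reverse mat_reverse mat_reverse_alt
  cases rows <;> cases cols
  · -- rows = false, cols = false
    simp [mat_copy, mat_copy_b, mat_is_void, mat_is_void_b]
  · -- rows = false, cols = true
    simp [PySem.List.slice?_none_none_neg_one, foldl_prepend_map]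
  · -- rows = true, cols = false
    simp only [Bool.and_false, Bool.not_true, Bool.false_and, if_false, if_true,
      Bool.false_eq_true]
    rw [foldl_append_map]
    simp [PySem.List.slice?_none_none_neg_one, foldl_insert_zero_rev]
  · -- rows = true, cols = true
    simp only [Bool.and_self, Bool.not_true, Bool.false_eq_true, ite_false, ite_true]
    rw [foldl_prepend_map]
    simp only [List.append_nil,
      PySem.List.slice?_none_none_neg_one, Option.getD_some, List.map_reverse,
      List.reverse_inj]
    rw [show (fun n => (PySem.List.pyGetD a n ([] : List Int)).reverse)
        = List.reverse ∘ (fun n => PySem.List.pyGetD a n []) from rfl,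
      ← List.map_map, PySem.List.map_pyGetD_pyRange_zero']
    simp [foldl_insert_zero_rev]
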